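-- pv_equiv track=rewrite | github.com/yannn-0430/SC6104 | Crypto_project/recover.py | build_maps
-- ===== SOURCE A (Python) =====
-- BITS = 128
--
-- def build_maps(steps):
--     # state_coeffs[i] is an integer mask (128-bit) telling which initial bits
--     # contribute to bit i of current state.
--     state_coeffs = [1 << i for i in range(BITS)]
--     maps = []
--     for step in range(steps):
--         maps.append(state_coeffs.copy())
--         # advance state by linear transform: t = s ^ (s<<7) ^ (s>>13) ^ rotl(s,37)
--         new_coeffs = [0] * BITS
--         for i in range(BITS):
--             coeff = state_coeffs[i]
--             # s contributes to bit i
--             new_coeffs[i] ^= coeff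
--             # s << 7 contributes to bit i+7
--             j = i + 7
--             if j < BITS:
--                 new_coeffs[j] ^= coeff
--             # s >> 13 contributes to bit i-13
--             j2 = i - 13
--             if j2 >= 0:
--                 new_coeffs[j2] ^= coeff
--             # rotl by 37 contributes to bit (i+37)%128
--             j3 = (i + 37) % BITS
--             new_coeffs[j3] ^= coeff
--         state_coeffs = new_coeffs
--     return maps
-- ===== SOURCE B (Python) =====
-- BITS = 128
--
-- def build_maps(steps):
--     # Gather formulation: each target bit reads its four sources directly.
--     state_coeffs = [1 << i for i in range(BITS)]
--     maps = []
--     for _ in range(steps):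
--         maps.append(state_coeffs.copy())
--         state_coeffs = [state_coeffs[j]
--                         ^ (state_coeffs[j - 7] if j >= 7 else 0)
--                         ^ (state_coeffs[j + 13] if j + 13 < BITS else 0)
--                         ^ state_coeffs[(j - 37) % BITS]
--                         for j in range(BITS)]
--     return maps
-- ===== Notes on version B (the rewrite author's own statement) =====
-- stated objective: alternative
-- what changed: The inner scatter loop (zero-initialized accumulator, XORing each source bit's coefficient into its four target slots) is replaced by a gather list comprehension that builds each target bit's mask directly from its four source bits; the accumulator list and its in-place updates disappear.
import Mathlib
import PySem

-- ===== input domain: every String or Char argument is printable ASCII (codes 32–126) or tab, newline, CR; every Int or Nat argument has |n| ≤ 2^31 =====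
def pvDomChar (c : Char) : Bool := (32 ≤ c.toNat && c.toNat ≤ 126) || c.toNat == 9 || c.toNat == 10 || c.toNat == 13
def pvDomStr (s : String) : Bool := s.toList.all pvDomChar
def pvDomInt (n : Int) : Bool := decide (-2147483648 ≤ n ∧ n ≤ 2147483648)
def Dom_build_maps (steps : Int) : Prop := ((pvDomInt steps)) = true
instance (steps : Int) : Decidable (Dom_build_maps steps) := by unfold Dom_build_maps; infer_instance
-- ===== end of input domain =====

-- B replaces A's zero-init-and-scatter inner loop by a direct gather comprehension
-- (each target bit reads its four source bits); same cost, plainer data flow.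

-- ===== PORT A =====
-- inner loop body of A: scatter coeff of source bit i into its four targets
def pvStepUpd (st : List Int) (new : List Int) (i : Int) : List Int :=
  let coeff := PySem.List.pyGetD st i 0
  let new1 := new.set i.toNat (PySem.Int.bxor (new.getD i.toNat 0) coeff)
  let new2 := if i + 7 < 128 then
      new1.set (i + 7).toNat (PySem.Int.bxor (new1.getD (i + 7).toNat 0) coeff) else new1
  let new3 := if 0 ≤ i - 13 then
      new2.set (i - 13).toNat (PySem.Int.bxor (new2.getD (i - 13).toNat 0) coeff) else new2
  new3.set (PySem.Int.mod (i + 37) 128).toNat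
    (PySem.Int.bxor (new3.getD (PySem.Int.mod (i + 37) 128).toNat 0) coeff)

def pvStepA (st : List Int) : List Int :=
  (PySem.List.pyRange 0 128).foldl (pvStepUpd st) (List.replicate 128 0)

def build_maps (steps : Int) : List (List Int) :=
  let state0 := (PySem.List.pyRange 0 128).map (fun i => (1 : Int) <<< i.toNat)
  (((PySem.List.pyRange 0 steps).foldl
      (fun (p : List (List Int) × List Int) _ => (p.1 ++ [p.2], pvStepA p.2))
      ([], state0))).1

-- ===== PORT B =====
-- B's gather step: each target bit j reads its four sources directly
def pvStepB (st : List Int) : List Int :=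
  (PySem.List.pyRange 0 128).map (fun j =>
    PySem.Int.bxor (PySem.Int.bxor (PySem.Int.bxor
      (PySem.List.pyGetD st j 0)
      (if 7 ≤ j then PySem.List.pyGetD st (j - 7) 0 else 0))
      (if j + 13 < 128 then PySem.List.pyGetD st (j + 13) 0 else 0))
      (PySem.List.pyGetD st (PySem.Int.mod (j - 37) 128) 0))

def build_maps_alt (steps : Int) : List (List Int) :=
  let state0 := (PySem.List.pyRange 0 128).map (fun i => (1 : Int) <<< i.toNat)
  (((PySem.List.pyRange 0 steps).foldl
      (fun (p : List (List Int) × List Int) _ => (p.1 ++ [p.2], pvStepB p.2))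
      ([], state0))).1

-- ===== PRECONDITION & SPEC =====
def Spec_build_maps (steps : Int) (out : List (List Int)) : Prop := out = build_maps_alt steps
instance (steps : Int) (out : List (List Int)) : Decidable (Spec_build_maps steps out) := by unfold Spec_build_maps; infer_instance

-- ===== CLAIM (what is proved, stated in full; the proofs are below) =====
def Claim_equal_build_maps : Prop := ∀ (steps : Int), Dom_build_maps steps → Spec_build_maps steps (build_maps steps)

-- ===== LEMMAS AND PROOFS =====

-- xor constructor lemmas (PySem has bxor_natCast, bxor_comm, bxor_zero; assoc is derived here)
theorem pv_bxor_negSucc_negSucc (m n : Nat) :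
    PySem.Int.bxor (Int.negSucc m) (Int.negSucc n) = ((m ^^^ n : Nat) : Int) := by
  simp [PySem.Int.bxor, Int.negSucc_eq]
  omega

theorem pv_bxor_natCast_negSucc (m n : Nat) :
    PySem.Int.bxor (m : Int) (Int.negSucc n) = Int.negSucc (m ^^^ n) := by
  simp [PySem.Int.bxor, Int.negSucc_eq]
  omega

theorem pv_bxor_negSucc_natCast (m n : Nat) :
    PySem.Int.bxor (Int.negSucc m) (n : Int) = Int.negSucc (m ^^^ n) := by
  simp [PySem.Int.bxor, Int.negSucc_eq]
  omega

theorem pv_bxor_assoc (a b c : Int) :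
    PySem.Int.bxor (PySem.Int.bxor a b) c = PySem.Int.bxor a (PySem.Int.bxor b c) := by
  cases a <;> cases b <;> cases c <;>
    simp [PySem.Int.bxor_natCast, pv_bxor_negSucc_negSucc, pv_bxor_natCast_negSucc,
      pv_bxor_negSucc_natCast, Nat.xor_assoc]

theorem pv_zero_bxor (a : Int) : PySem.Int.bxor 0 a = a := by
  rw [PySem.Int.bxor_comm]; exact PySem.Int.bxor_zero a

theorem pv_bxor_left_comm (a b c : Int) :
    PySem.Int.bxor a (PySem.Int.bxor b c) = PySem.Int.bxor b (PySem.Int.bxor a c) := by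
  rw [← pv_bxor_assoc, PySem.Int.bxor_comm a b, pv_bxor_assoc]

-- xor-fold over a list of indices
def pvXf (e : Int → Int) (is : List Int) : Int :=
  is.foldl (fun s i => PySem.Int.bxor s (e i)) 0

theorem pvXf_start (e : Int → Int) (is : List Int) :
    ∀ s, is.foldl (fun s i => PySem.Int.bxor s (e i)) s = PySem.Int.bxor s (pvXf e is) := by
  induction is with
  | nil => intro s; simp [pvXf, PySem.Int.bxor_zero]
  | cons a is ih =>
      intro s
      have h2 : pvXf e (a :: is) = PySem.Int.bxor (e a) (pvXf e is) := by
        show List.foldl _ (PySem.Int.bxor 0 (e a)) is = _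
        rw [ih, pv_zero_bxor]
      show List.foldl _ (PySem.Int.bxor s (e a)) is = _
      rw [ih, h2, ← pv_bxor_assoc]

theorem pvXf_cons (e : Int → Int) (a : Int) (is : List Int) :
    pvXf e (a :: is) = PySem.Int.bxor (e a) (pvXf e is) := by
  simp only [pvXf, List.foldl_cons]
  rw [pvXf_start e is (PySem.Int.bxor 0 (e a)), pv_zero_bxor]
  rfl

theorem pvXf_split (e1 e2 : Int → Int) (is : List Int) :
    pvXf (fun i => PySem.Int.bxor (e1 i) (e2 i)) is
      = PySem.Int.bxor (pvXf e1 is) (pvXf e2 is) := by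
  induction is with
  | nil => simp [pvXf]
  | cons a is ih =>
      rw [pvXf_cons, pvXf_cons, pvXf_cons, ih]
      rw [pv_bxor_assoc, pv_bxor_left_comm (e2 a), ← pv_bxor_assoc]

theorem pvXf_indicator (a v : Int) (is : List Int) (h : is.Nodup) :
    pvXf (fun i => if i = a then v else 0) is = if a ∈ is then v else 0 := by
  induction is with
  | nil => simp [pvXf]
  | cons b is ih =>
      rw [pvXf_cons]
      rcases List.nodup_cons.mp h with ⟨hb, hn⟩
      by_cases hba : b = a
      · subst hba
        rw [ih hn]
        simp [hb, PySem.Int.bxor_zero]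
      · rw [ih hn]
        simp [hba, Ne.symm hba, List.mem_cons, pv_zero_bxor]

-- getD after a single xor-set
theorem pv_getD_set (l : List Int) (k j : Nat) (v : Int) (hj : j < l.length) :
    (l.set k v).getD j 0 = if k = j then v else l.getD j 0 := by
  rw [List.getD_eq_getElem _ _ (by simpa using hj), List.getD_eq_getElem _ _ hj]
  exact List.getElem_set (by simpa using hj)

theorem pvStepUpd_length (st new : List Int) (i : Int) :
    (pvStepUpd st new i).length = new.length := by
  unfold pvStepUpd
  split_ifs <;> simp

-- the contribution of source bit i to target bit j, matching A's four scatter targets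
def pvContrib (st : List Int) (j : Nat) (i : Int) : Int :=
  PySem.Int.bxor (PySem.Int.bxor (PySem.Int.bxor
    (if i = (j : Int) then PySem.List.pyGetD st (j : Int) 0 else 0)
    (if i = (j : Int) - 7 then PySem.List.pyGetD st ((j : Int) - 7) 0 else 0))
    (if i = (j : Int) + 13 then PySem.List.pyGetD st ((j : Int) + 13) 0 else 0))
    (if i = PySem.Int.mod ((j : Int) - 37) 128 then
        PySem.List.pyGetD st (PySem.Int.mod ((j : Int) - 37) 128) 0 else 0)

-- effect of each of A's four scatter writes on entry j
theorem pv_op1_getD (st l : List Int) (iN j : Nat) (hj : j < 128) (hl : l.length = 128) :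
    (l.set iN (PySem.Int.bxor (l.getD iN 0) (PySem.List.pyGetD st (iN : Int) 0))).getD j 0
      = PySem.Int.bxor (l.getD j 0)
          (if (iN : Int) = (j : Int) then PySem.List.pyGetD st (j : Int) 0 else 0) := by
  rw [pv_getD_set _ _ _ _ (by omega)]
  by_cases h : iN = j
  · subst h; simp
  · have h1 : ¬((iN : Int) = (j : Int)) := by omega
    rw [if_neg h, if_neg h1, PySem.Int.bxor_zero]

theorem pv_op2_getD (st l : List Int) (iN j : Nat) (hj : j < 128) (hl : l.length = 128) :
    (if (iN : Int) + 7 < 128 then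
        l.set (iN + 7) (PySem.Int.bxor (l.getD (iN + 7) 0) (PySem.List.pyGetD st (iN : Int) 0))
      else l).getD j 0
      = PySem.Int.bxor (l.getD j 0)
          (if (iN : Int) = (j : Int) - 7 then PySem.List.pyGetD st ((j : Int) - 7) 0 else 0) := by
  by_cases hg : (iN : Int) + 7 < 128
  · rw [if_pos hg, pv_getD_set _ _ _ _ (by omega)]
    by_cases h : iN + 7 = j
    · have h1 : (iN : Int) = (j : Int) - 7 := by omega
      have h2 : (j : Int) - 7 = (iN : Int) := by omega
      rw [if_pos h, if_pos h1, h, h2]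
    · have h1 : ¬((iN : Int) = (j : Int) - 7) := by omega
      rw [if_neg h, if_neg h1, PySem.Int.bxor_zero]
  · rw [if_neg hg]
    have h1 : ¬((iN : Int) = (j : Int) - 7) := by omega
    rw [if_neg h1, PySem.Int.bxor_zero]

theorem pv_op3_getD (st l : List Int) (iN j : Nat) (hj : j < 128) (hl : l.length = 128) :
    (if (0 : Int) ≤ (iN : Int) - 13 then
        l.set (iN - 13) (PySem.Int.bxor (l.getD (iN - 13) 0) (PySem.List.pyGetD st (iN : Int) 0))
      else l).getD j 0
      = PySem.Int.bxor (l.getD j 0)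
          (if (iN : Int) = (j : Int) + 13 then PySem.List.pyGetD st ((j : Int) + 13) 0 else 0) := by
  by_cases hg : (0 : Int) ≤ (iN : Int) - 13
  · rw [if_pos hg, pv_getD_set _ _ _ _ (by omega)]
    by_cases h : iN - 13 = j
    · have h1 : (iN : Int) = (j : Int) + 13 := by omega
      have h2 : (j : Int) + 13 = (iN : Int) := by omega
      rw [if_pos h, if_pos h1, h, h2]
    · have h1 : ¬((iN : Int) = (j : Int) + 13) := by omega
      rw [if_neg h, if_neg h1, PySem.Int.bxor_zero]
  · rw [if_neg hg]
    have h1 : ¬((iN : Int) = (j : Int) + 13) := by omega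
    rw [if_neg h1, PySem.Int.bxor_zero]

theorem pv_op4_getD (st l : List Int) (iN j : Nat) (hiN : iN < 128) (hj : j < 128)
    (hl : l.length = 128) :
    (l.set ((iN + 37) % 128)
        (PySem.Int.bxor (l.getD ((iN + 37) % 128) 0) (PySem.List.pyGetD st (iN : Int) 0))).getD j 0
      = PySem.Int.bxor (l.getD j 0)
          (if (iN : Int) = (((j + 91) % 128 : Nat) : Int) then
              PySem.List.pyGetD st (((j + 91) % 128 : Nat) : Int) 0 else 0) := by
  rw [pv_getD_set _ _ _ _ (by omega)]
  by_cases h : (iN + 37) % 128 = j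
  · have h1 : (iN : Int) = (((j + 91) % 128 : Nat) : Int) := by omega
    have h2 : (((j + 91) % 128 : Nat) : Int) = (iN : Int) := by omega
    rw [if_pos h, if_pos h1, h, h2]
  · have h1 : ¬((iN : Int) = (((j + 91) % 128 : Nat) : Int)) := by omega
    rw [if_neg h, if_neg h1, PySem.Int.bxor_zero]

theorem pvStepUpd_getD (st new : List Int) (i : Int) (hi0 : 0 ≤ i) (hi1 : i < 128)
    (hlen : new.length = 128) (j : Nat) (hj : j < 128) :
    (pvStepUpd st new i).getD j 0
      = PySem.Int.bxor (new.getD j 0) (pvContrib st j i) := by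
  obtain ⟨iN, rfl⟩ : ∃ n : Nat, i = (n : Int) := ⟨i.toNat, (Int.toNat_of_nonneg hi0).symm⟩
  have hiN : iN < 128 := by omega
  have e1 : ((iN : Int)).toNat = iN := Int.toNat_natCast iN
  have e2 : ((iN : Int) + 7).toNat = iN + 7 := by omega
  have e3 : ((iN : Int) - 13).toNat = iN - 13 := by omega
  have e4 : (PySem.Int.mod ((iN : Int) + 37) 128).toNat = (iN + 37) % 128 := by
    rw [PySem.Int.mod_eq_emod_of_pos (by norm_num)]; omega
  have hm : PySem.Int.mod ((j : Int) - 37) 128 = (((j + 91) % 128 : Nat) : Int) := by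
    rw [PySem.Int.mod_eq_emod_of_pos (by norm_num)]; omega
  have len1 : (new.set iN (PySem.Int.bxor (new.getD iN 0) (PySem.List.pyGetD st (iN : Int) 0))).length = 128 := by
    simp [hlen]
  have len2 : ((if (iN : Int) + 7 < 128 then
      (new.set iN (PySem.Int.bxor (new.getD iN 0) (PySem.List.pyGetD st (iN : Int) 0))).set (iN + 7)
        (PySem.Int.bxor ((new.set iN (PySem.Int.bxor (new.getD iN 0) (PySem.List.pyGetD st (iN : Int) 0))).getD (iN + 7) 0) (PySem.List.pyGetD st (iN : Int) 0))
      else (new.set iN (PySem.Int.bxor (new.getD iN 0) (PySem.List.pyGetD st (iN : Int) 0))))).length = 128 := by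
    split_ifs <;> simp [hlen]
  simp only [pvStepUpd, e1, e2, e3, e4]
  rw [pv_op4_getD st _ iN j hiN hj (by split_ifs <;> simp_all),
    pv_op3_getD st _ iN j hj len2,
    pv_op2_getD st _ iN j hj len1,
    pv_op1_getD st _ iN j hj hlen]
  simp only [pvContrib, hm, pv_bxor_assoc]

theorem pv_scatter_getD (st : List Int) (is : List Int) (his : ∀ i ∈ is, 0 ≤ i ∧ i < 128) :
    ∀ (new : List Int), new.length = 128 → ∀ j : Nat, j < 128 →
      (is.foldl (pvStepUpd st) new).getD j 0
        = PySem.Int.bxor (new.getD j 0) (pvXf (pvContrib st j) is) := by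
  induction is with
  | nil => intro new _ j _; simp [pvXf, PySem.Int.bxor_zero]
  | cons a is ih =>
      intro new hlen j hj
      have ha := his a (List.mem_cons_self ..)
      have his' : ∀ i ∈ is, 0 ≤ i ∧ i < 128 := fun i hi => his i (List.mem_cons_of_mem _ hi)
      simp only [List.foldl_cons]
      rw [ih his' _ (by rw [pvStepUpd_length]; exact hlen) j hj,
        pvStepUpd_getD st new a ha.1 ha.2 hlen j hj, pvXf_cons, pv_bxor_assoc]

theorem pv_range_nodup : (PySem.List.pyRange 0 128).Nodup := by
  rw [show ((128 : Int)) = ((128 : Nat) : Int) by norm_num, PySem.List.pyRange_zero_natCast]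
  exact (List.nodup_range).map (fun a b h => by exact_mod_cast h)

theorem pvStepA_getD (st : List Int) (j : Nat) (hj : j < 128) :
    (pvStepA st).getD j 0
      = PySem.Int.bxor (PySem.Int.bxor (PySem.Int.bxor
          (PySem.List.pyGetD st (j : Int) 0)
          (if 7 ≤ (j : Int) then PySem.List.pyGetD st ((j : Int) - 7) 0 else 0))
          (if (j : Int) + 13 < 128 then PySem.List.pyGetD st ((j : Int) + 13) 0 else 0))
          (PySem.List.pyGetD st (PySem.Int.mod ((j : Int) - 37) 128) 0) := by
  have hm : PySem.Int.mod ((j : Int) - 37) 128 = (((j + 91) % 128 : Nat) : Int) := by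
    rw [PySem.Int.mod_eq_emod_of_pos (by norm_num)]; omega
  have hmem : ∀ i ∈ PySem.List.pyRange 0 128, 0 ≤ i ∧ i < 128 :=
    fun i hi => PySem.List.mem_pyRange_one.mp hi
  unfold pvStepA
  rw [pv_scatter_getD st _ hmem _ (by simp) j hj]
  rw [show (List.replicate 128 (0 : Int)).getD j 0 = 0 by
      rw [List.getD_eq_getElem?_getD, List.getElem?_replicate]; split <;> rfl, pv_zero_bxor]
  have hc : pvContrib st j
      = (fun i => PySem.Int.bxor
          ((fun i => PySem.Int.bxor
            ((fun i => PySem.Int.bxor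
              ((fun i => if i = (j : Int) then PySem.List.pyGetD st (j : Int) 0 else 0) i)
              ((fun i => if i = (j : Int) - 7 then PySem.List.pyGetD st ((j : Int) - 7) 0 else 0) i)) i)
            ((fun i => if i = (j : Int) + 13 then PySem.List.pyGetD st ((j : Int) + 13) 0 else 0) i)) i)
          ((fun i => if i = (((j + 91) % 128 : Nat) : Int) then
              PySem.List.pyGetD st (((j + 91) % 128 : Nat) : Int) 0 else 0) i)) := by
    funext i; simp only [pvContrib, hm]
  rw [hc, pvXf_split, pvXf_split, pvXf_split]
  rw [pvXf_indicator _ _ _ pv_range_nodup, pvXf_indicator _ _ _ pv_range_nodup,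
    pvXf_indicator _ _ _ pv_range_nodup, pvXf_indicator _ _ _ pv_range_nodup]
  simp only [PySem.List.mem_pyRange_one]
  rw [if_pos (show (0 : Int) ≤ (j : Int) ∧ (j : Int) < 128 by omega),
    if_congr (show ((0 : Int) ≤ (j : Int) - 7 ∧ (j : Int) - 7 < 128) ↔ 7 ≤ (j : Int) by omega) rfl rfl,
    if_congr (show ((0 : Int) ≤ (j : Int) + 13 ∧ (j : Int) + 13 < 128) ↔ (j : Int) + 13 < 128 by omega) rfl rfl,
    if_pos (show (0 : Int) ≤ (((j + 91) % 128 : Nat) : Int) ∧ (((j + 91) % 128 : Nat) : Int) < 128 by omega)]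
  rw [hm]

theorem pvStepA_length (st : List Int) : (pvStepA st).length = 128 := by
  unfold pvStepA
  have : ∀ (is : List Int) (new : List Int), (is.foldl (pvStepUpd st) new).length = new.length := by
    intro is
    induction is with
    | nil => intro new; rfl
    | cons a is ih => intro new; simp only [List.foldl_cons]; rw [ih, pvStepUpd_length]
  rw [this]; simp

theorem pvStepB_length (st : List Int) : (pvStepB st).length = 128 := by
  unfold pvStepB
  rw [List.length_map,
    show ((128 : Int)) = ((128 : Nat) : Int) by norm_num, PySem.List.pyRange_zero_natCast]
  simp

theorem pvStep_eq (st : List Int) : pvStepA st = pvStepB st := by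
  have hopt : ∀ (o : Option Int), o.isSome → o = some (o.getD 0) := by
    intro o h; cases o with
    | none => simp at h
    | some v => rfl
  apply List.ext_getElem?_iff.mpr
  intro j
  by_cases hj : j < 128
  · rw [hopt ((pvStepA st)[j]?) (by simp only [isSome_getElem?, pvStepA_length]; exact hj),
      hopt ((pvStepB st)[j]?) (by simp only [isSome_getElem?, pvStepB_length]; exact hj),
      ← List.getD_eq_getElem?_getD, ← List.getD_eq_getElem?_getD]
    rw [pvStepA_getD st j hj]
    unfold pvStepB
    rw [show ((128 : Int)) = ((128 : Nat) : Int) by norm_num, PySem.List.pyRange_zero_natCast,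
      List.map_map]
    rw [PySem.List.getD_map_range _ _ _ _ hj]
    rfl
  · rw [List.getElem?_eq_none (by rw [pvStepA_length]; omega),
      List.getElem?_eq_none (by rw [pvStepB_length]; omega)]

-- ===== VERDICT (by name: the statement is the Claim_ definition above) =====
theorem build_maps_spec : Claim_equal_build_maps := by
  intro steps _
  unfold Spec_build_maps build_maps build_maps_alt
  have : pvStepA = pvStepB := funext pvStep_eq
  rw [this]
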